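-- pv_equiv track=rewrite | github.com/krillato/Tammarat.github.io | Functions/EP79 checkletter.py | chekString
-- ===== SOURCE A (Python) =====
-- def chekString(mesage):
--     result={"UPPER":0,"LOWER":0}
--     for c in mesage:
--         if c.isupper():
--             result["UPPER"]+=1
--         elif c.lower():
--             result["LOWER"]+=1
--         else :
--             pass
--     return result
-- ===== SOURCE B (Python) =====
-- def _count_upper(s):
--     # divide and conquer: split the string in half and add the two counts
--     if len(s) == 0:
--         return 0
--     if len(s) == 1:
--         return 1 if s.isupper() else 0
--     mid = len(s) // 2
--     return _count_upper(s[:mid]) + _count_upper(s[mid:])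
--
-- def chekString(mesage):
--     upper = _count_upper(mesage)
--     return {"UPPER": upper, "LOWER": len(mesage) - upper}
-- ===== Notes on version B (the rewrite author's own statement) =====
-- stated objective: alternative
-- what changed: B computes the uppercase count by a divide-and-conquer recursion on string halves instead of A's single left-to-right pass mutating a dict, and derives LOWER as len(mesage) - upper, since A's elif tests the lowercased one-character string, which is always truthy, so A's LOWER counts every non-uppercase character.
import Mathlib
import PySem

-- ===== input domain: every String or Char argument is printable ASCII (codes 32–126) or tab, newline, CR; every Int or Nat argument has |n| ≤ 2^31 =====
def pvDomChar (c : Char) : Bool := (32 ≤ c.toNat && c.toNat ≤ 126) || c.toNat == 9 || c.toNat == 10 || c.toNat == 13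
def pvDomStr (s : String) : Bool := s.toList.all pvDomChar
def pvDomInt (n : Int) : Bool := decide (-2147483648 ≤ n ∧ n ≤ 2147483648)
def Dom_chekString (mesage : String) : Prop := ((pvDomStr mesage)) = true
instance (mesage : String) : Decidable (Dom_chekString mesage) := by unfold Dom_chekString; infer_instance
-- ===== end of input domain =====

-- B counts uppercase by divide-and-conquer on string halves and derives LOWER as len - upper
-- (A's elif is always truthy, so A's LOWER counts every non-uppercase char); alternative structure, not faster.

-- ===== PORT A =====
-- loop body of A: if c.isupper(): result["UPPER"]+=1 elif c.lower(): result["LOWER"]+=1 else: pass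
def chekStep (result : PySem.Dict String Int) (c : Char) : PySem.Dict String Int :=
  if PySem.Chars.isupper c then result.modify "UPPER" 0 (· + 1)
  else if PySem.Str.len (PySem.Str.lower (String.ofList [c])) ≠ 0 then result.modify "LOWER" 0 (· + 1)
  else result

def chekString (mesage : String) : List (String × Int) :=
  (mesage.toList.foldl chekStep (PySem.Dict.ofList [("UPPER", 0), ("LOWER", 0)])).items

-- ===== PORT B =====
-- _count_upper: divide and conquer over halves, base cases len 0 and len 1
def countUpperDC : List Char → Int
  | [] => 0
  | [c] => if PySem.Chars.isupper c then 1 else 0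
  | c1 :: c2 :: rest =>
      let s := c1 :: c2 :: rest
      countUpperDC (s.take (s.length / 2)) + countUpperDC (s.drop (s.length / 2))
termination_by s => s.length
decreasing_by
  · simp [List.length_take]; omega
  · simp [List.length_drop]; omega

def chekString_alt (mesage : String) : List (String × Int) :=
  let upper := countUpperDC mesage.toList
  [("UPPER", upper), ("LOWER", PySem.Str.len mesage - upper)]

-- ===== PRECONDITION & SPEC =====
def Spec_chekString (mesage : String) (out : List (String × Int)) : Prop := out = chekString_alt mesage
instance (mesage : String) (out : List (String × Int)) : Decidable (Spec_chekString mesage out) := by unfold Spec_chekString; infer_instance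

-- ===== CLAIM (what is proved, stated in full; the proofs are below) =====
def Claim_equal_chekString : Prop := ∀ (mesage : String), Dom_chekString mesage → Spec_chekString mesage (chekString mesage)

-- ===== LEMMAS AND PROOFS =====

-- A's loop invariant: the dict stays {"UPPER": u, "LOWER": l} and accumulates the two counts
lemma chekLoop_items (cs : List Char) (u l : Int) :
    (cs.foldl chekStep (PySem.Dict.mk [("UPPER", u), ("LOWER", l)])).items
      = [("UPPER", u + (cs.countP PySem.Chars.isupper : Int)),
         ("LOWER", l + ((cs.length : Int) - (cs.countP PySem.Chars.isupper : Int)))] := by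
  induction cs generalizing u l with
  | nil => simp
  | cons c cs ih =>
    simp only [List.foldl_cons, chekStep]
    by_cases h : PySem.Chars.isupper c
    · simp only [h, if_true, PySem.Dict.modify, PySem.Dict.insert, PySem.Dict.getD,
        PySem.Dict.get?, PySem.Dict.contains]
      simp [ih, h]
      ring
    · simp only [h, PySem.Dict.modify, PySem.Dict.insert,
        PySem.Dict.getD, PySem.Dict.get?, PySem.Dict.contains,
        PySem.Str.len, PySem.Str.lower, PySem.Chars.lower]
      simp [ih, h]
      ring

-- the divide-and-conquer count equals the linear count
lemma countUpperDC_eq (s : List Char) :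
    countUpperDC s = (s.countP PySem.Chars.isupper : Int) := by
  induction s using countUpperDC.induct with
  | case1 => simp [countUpperDC]
  | case2 c h => simp [countUpperDC, h]
  | case3 c h => simp [countUpperDC, h]
  | case4 c1 c2 rest s ihtake ihdrop =>
    rw [countUpperDC]
    rw [ihtake, ihdrop]
    have h := List.take_append_drop ((c1 :: c2 :: rest).length / 2) (c1 :: c2 :: rest)
    conv_rhs => rw [← h]
    rw [List.countP_append]
    push_cast
    ring

-- ===== VERDICT (by name: the statement is the Claim_ definition above) =====
theorem chekString_spec : Claim_equal_chekString := by
  intro mesage _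
  unfold Spec_chekString chekString chekString_alt
  have h0 : PySem.Dict.ofList ([("UPPER", (0:Int)), ("LOWER", 0)])
      = PySem.Dict.mk [("UPPER", 0), ("LOWER", 0)] := by decide
  rw [h0, chekLoop_items, countUpperDC_eq]
  simp [PySem.Str.len]
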